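-- pv_equiv track=rewrite | github.com/Abolfazlyousefii/QRCode | persianizer_tool.py | apply_rtl_layout_fixes
-- ===== SOURCE A (Python) =====
-- def apply_rtl_layout_fixes(text: str) -> tuple[str, int]:
--     replacements = 0
--     rules = [
--         ('justify="left"', 'justify="right"'),
--         ("justify='left'", "justify='right'"),
--         ('anchor="w"', 'anchor="e"'),
--         ("anchor='w'", "anchor='e'"),
--         # موارد خیلی رایج در برچسب‌ها و گرید
--         ('sticky="w"', 'sticky="e"'),
--         ("sticky='w'", "sticky='e'"),
--         ('side="left"', 'side="right"'),
--         ("side='left'", "side='right'"),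
--     ]
--     for old, new in rules:
--         count = text.count(old)
--         if count:
--             text = text.replace(old, new)
--             replacements += count
--     return text, replacements
-- ===== SOURCE B (Python) =====
-- RTL_ATTRS = [
--     ("justify", "left", "right"),
--     ("anchor", "w", "e"),
--     ("sticky", "w", "e"),
--     ("side", "left", "right"),
-- ]
--
-- RTL_RULES = [
--     (f"{attr}={q}{ltr}{q}", f"{attr}={q}{rtl}{q}")
--     for attr, ltr, rtl in RTL_ATTRS
--     for q in ('"', "'")
-- ]
--
--
-- def apply_rtl_layout_fixes(text: str) -> tuple[str, int]:
--     # single left-to-right pass: at each position either one rule fires or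
--     # the character is copied unchanged
--     out = []
--     count = 0
--     i = 0
--     n = len(text)
--     while i < n:
--         for old, new in RTL_RULES:
--             if text.startswith(old, i):
--                 out.append(new)
--                 i += len(old)
--                 count += 1
--                 break
--         else:
--             out.append(text[i])
--             i += 1
--     return "".join(out), count
-- ===== Notes on version B (the rewrite author's own statement) =====
-- stated objective: alternative
-- what changed: A makes eight sequential count-then-replace passes over the text (one per LTR attribute); B makes a single left-to-right pass that at each position tries the eight literal patterns, emits the replacement and skips the match (or copies the character), counting matches as it goes.
import Mathlib
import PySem

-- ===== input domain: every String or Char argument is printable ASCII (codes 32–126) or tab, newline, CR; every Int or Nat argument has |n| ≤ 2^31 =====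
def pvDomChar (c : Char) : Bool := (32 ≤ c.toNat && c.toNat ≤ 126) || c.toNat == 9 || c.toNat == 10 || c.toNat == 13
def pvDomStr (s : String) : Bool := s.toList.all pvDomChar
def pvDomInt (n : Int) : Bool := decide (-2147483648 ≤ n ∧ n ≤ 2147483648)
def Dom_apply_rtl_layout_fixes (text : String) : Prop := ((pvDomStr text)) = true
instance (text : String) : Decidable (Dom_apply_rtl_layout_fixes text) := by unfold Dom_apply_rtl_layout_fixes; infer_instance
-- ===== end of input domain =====

-- B replaces A's eight sequential count-and-replace passes by one left-to-right scan that
-- tries all eight patterns at each position (objective: alternative algorithm, not faster).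

-- ===== PORT A =====
def apply_rtl_layout_fixes (text : String) : String × Int :=
  let rules : List (String × String) :=
    [("justify=\"left\"", "justify=\"right\""),
     ("justify='left'", "justify='right'"),
     ("anchor=\"w\"", "anchor=\"e\""),
     ("anchor='w'", "anchor='e'"),
     ("sticky=\"w\"", "sticky=\"e\""),
     ("sticky='w'", "sticky='e'"),
     ("side=\"left\"", "side=\"right\""),
     ("side='left'", "side='right'")]
  rules.foldl
    (fun st rule =>
      let count := PySem.Str.count st.1 rule.1
      if count ≠ 0 then (PySem.Str.replace st.1 rule.1 rule.2, st.2 + (count : Int))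
      else st)
    (text, 0)

-- ===== PORT B =====
def rtlAttrs : List (String × String × String) :=
  [("justify", "left", "right"),
   ("anchor", "w", "e"),
   ("sticky", "w", "e"),
   ("side", "left", "right")]

def rtlRules : List (List Char × List Char) :=
  rtlAttrs.flatMap (fun a =>
    ['\"', '\''].map (fun q =>
      (a.1.toList ++ '=' :: q :: (a.2.1.toList ++ [q]),
       a.1.toList ++ '=' :: q :: (a.2.2.toList ++ [q]))))

def scanRTL (s : List Char) : List Char × Int :=
  match s with
  | [] => ([], 0)
  | c :: t =>
    match rtlRules.find? (fun r => r.1.isPrefixOf (c :: t)) with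
    | some r =>
      let rest := scanRTL (t.drop (r.1.length - 1))
      (r.2 ++ rest.1, rest.2 + 1)
    | none =>
      let rest := scanRTL t
      (c :: rest.1, rest.2)
termination_by s.length
decreasing_by all_goals simp

def apply_rtl_layout_fixes_alt (text : String) : String × Int :=
  let r := scanRTL text.toList
  (String.ofList r.1, r.2)

-- ===== PRECONDITION & SPEC =====
def Spec_apply_rtl_layout_fixes (text : String) (out : String × Int) : Prop := out = apply_rtl_layout_fixes_alt text
instance (text : String) (out : String × Int) : Decidable (Spec_apply_rtl_layout_fixes text out) := by unfold Spec_apply_rtl_layout_fixes; infer_instance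

-- ===== CLAIM =====
def Claim_equal_apply_rtl_layout_fixes : Prop := ∀ (text : String), Dom_apply_rtl_layout_fixes text → Spec_apply_rtl_layout_fixes text (apply_rtl_layout_fixes text)

-- ===== LEMMAS AND PROOFS =====

def rep1 (o n : List Char) : List Char → List Char × Nat
  | [] => ([], 0)
  | c :: t =>
    if o.isPrefixOf (c :: t) then
      let r := rep1 o n (t.drop (o.length - 1))
      (n ++ r.1, r.2 + 1)
    else
      let r := rep1 o n t
      (c :: r.1, r.2)
termination_by s => s.length
decreasing_by all_goals simp

theorem count_go_eq (o n : List Char) (ho : o ≠ []) :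
    ∀ fuel l acc, l.length ≤ fuel → PySem.Chars.count.go o fuel l acc = acc + (rep1 o n l).2 := by
  intro fuel
  induction fuel with
  | zero => intro l acc h; rw [List.length_eq_zero_iff.mp (Nat.le_zero.mp h)]; simp [PySem.Chars.count.go, rep1]
  | succ f ih =>
    intro l acc h
    match l with
    | [] => simp [PySem.Chars.count.go, rep1]
    | c :: t =>
      rw [PySem.Chars.count.go]
      by_cases hp : o.isPrefixOf (c :: t)
      · obtain ⟨k, hk⟩ : ∃ k, o.length = k + 1 := ⟨o.length - 1, by cases o <;> simp_all⟩
        simp only [hp, if_pos, rep1, hk]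
        rw [List.drop_succ_cons, ih _ _ (by simp [List.length_drop] at h ⊢; omega)]
        simp [Nat.add_comm, Nat.add_left_comm]
      · simp only [hp, rep1, if_neg, Bool.false_eq_true, not_false_iff]
        exact ih _ _ (by simp at h; omega)

theorem replace_go_eq (o n : List Char) (ho : o ≠ []) :
    ∀ fuel l acc, l.length ≤ fuel →
      PySem.Chars.replace.go o n fuel l acc = acc.reverse ++ (rep1 o n l).1 := by
  intro fuel
  induction fuel with
  | zero => intro l acc h; rw [List.length_eq_zero_iff.mp (Nat.le_zero.mp h)]; simp [PySem.Chars.replace.go, rep1]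
  | succ f ih =>
    intro l acc h
    match l with
    | [] => simp [PySem.Chars.replace.go, rep1]
    | c :: t =>
      rw [PySem.Chars.replace.go]
      by_cases hp : o.isPrefixOf (c :: t)
      · obtain ⟨k, hk⟩ : ∃ k, o.length = k + 1 := ⟨o.length - 1, by cases o <;> simp_all⟩
        simp only [hp, if_pos, rep1, hk]
        rw [List.drop_succ_cons, ih _ _ (by simp [List.length_drop] at h ⊢; omega)]
        simp
      · simp only [hp, rep1, if_neg, Bool.false_eq_true, not_false_iff]
        rw [ih _ _ (by simp at h; omega)]
        simp

theorem count_eq_rep1 (s o n : List Char) (ho : o ≠ []) :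
    PySem.Chars.count s o = (rep1 o n s).2 := by
  rw [PySem.Chars.count]
  rw [if_neg (by simp [ho])]
  rw [count_go_eq o n ho s.length s 0 (Nat.le_refl _)]
  simp

theorem replace_eq_rep1 (s o n : List Char) (ho : o ≠ []) :
    PySem.Chars.replace s o n = (rep1 o n s).1 := by
  rw [PySem.Chars.replace]
  rw [if_neg (by simp [ho])]
  rw [replace_go_eq o n ho s.length s [] (Nat.le_refl _)]
  simp

theorem rep1_cnt_zero (o n : List Char) (s : List Char) (h : (rep1 o n s).2 = 0) :
    (rep1 o n s).1 = s := by
  fun_induction rep1 o n s with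
  | case1 => rfl
  | case2 c t hp r ih => simp at h
  | case3 c t hp r ih =>
    simp only at h ⊢
    rw [ih h]

theorem prefix_append_cases {l a b : List Char} (h : l <+: a ++ b) :
    l <+: a ∨ (a <+: l ∧ l.drop a.length <+: b) := by
  by_cases hl : l.length ≤ a.length
  · exact Or.inl (List.prefix_of_prefix_length_le h (List.prefix_append a b) hl)
  · right
    have hal : a <+: l := List.prefix_of_prefix_length_le (List.prefix_append a b) h (by omega)
    refine ⟨hal, ?_⟩
    obtain ⟨l', rfl⟩ := hal
    simpa using h

theorem rep1_cons_neg (o n : List Char) (c : Char) (t : List Char) (hp : ¬ o <+: c :: t) :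
    rep1 o n (c :: t) = (c :: (rep1 o n t).1, (rep1 o n t).2) := by
  rw [rep1]
  rw [if_neg (by simpa [List.isPrefixOf_iff_prefix] using hp)]

theorem rep1_match (o n t : List Char) (ho : o ≠ []) :
    rep1 o n (o ++ t) = (n ++ (rep1 o n t).1, (rep1 o n t).2 + 1) := by
  obtain ⟨c, o', rfl⟩ : ∃ c o', o = c :: o' := by cases o with | nil => simp at ho | cons a b => exact ⟨a, b, rfl⟩
  rw [List.cons_append, rep1]
  rw [if_pos (by simp [List.isPrefixOf_iff_prefix])]
  simp

theorem rep1_skip (o n w t : List Char)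
    (H : ∀ p, p < w.length → ¬ (w.drop p <+: o) ∧ ¬ (o <+: w.drop p)) :
    rep1 o n (w ++ t) = (w ++ (rep1 o n t).1, (rep1 o n t).2) := by
  induction w with
  | nil => simp
  | cons c w' ih =>
    have h0 := H 0 (by simp)
    simp only [List.drop_zero] at h0
    rw [List.cons_append, rep1_cons_neg]
    · rw [ih (fun p hp => by simpa using H (p + 1) (by simpa using hp))]
      simp
    · intro hcon
      rcases prefix_append_cases (by simpa using hcon : o <+: (c :: w') ++ t) with h | h
      · exact h0.2 h
      · exact h0.1 h.1

theorem rep1_no_new (o n o' : List Char)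
    (H1 : ∀ q, q < o'.length → ¬ (o'.drop q <+: n) ∧ ¬ (n <+: o'.drop q)) :
    ∀ s q, q < o'.length → o'.drop q <+: (rep1 o n s).1 → o'.drop q <+: s := by
  intro s
  fun_induction rep1 o n s with
  | case1 =>
    intro q hq hcon
    simp only [List.prefix_nil] at hcon
    have : o'.length ≤ q := List.drop_eq_nil_iff.mp hcon
    omega
  | case2 c t hp r ih =>
    intro q hq hcon
    simp only at hcon
    rcases prefix_append_cases hcon with h | h
    · exact absurd h (H1 q hq).1
    · exact absurd h.1 (H1 q hq).2
  | case3 c t hp r ih =>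
    intro q hq hcon
    simp only at hcon
    rw [List.drop_eq_getElem_cons hq] at hcon ⊢
    obtain ⟨hqc, htail⟩ := List.cons_prefix_cons.mp hcon
    by_cases hq1 : q + 1 < o'.length
    · exact List.cons_prefix_cons.mpr ⟨hqc, ih (q + 1) hq1 htail⟩
    · have : o'.drop (q + 1) = [] := List.drop_eq_nil_iff.mpr (by omega)
      rw [this]
      exact List.cons_prefix_cons.mpr ⟨hqc, List.nil_prefix⟩

def seqF : List (List Char × List Char) → List Char → List Char × Nat
  | [], s => (s, 0)
  | r :: rs, s =>
    let p := rep1 r.1 r.2 s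
    let q := seqF rs p.1
    (q.1, p.2 + q.2)

theorem seqF_append (xs ys : List (List Char × List Char)) (s : List Char) :
    seqF (xs ++ ys) s =
      ((seqF ys (seqF xs s).1).1, (seqF xs s).2 + (seqF ys (seqF xs s).1).2) := by
  induction xs generalizing s with
  | nil => simp [seqF]
  | cons r xs ih => simp [seqF, ih, Nat.add_assoc]

theorem seqF_skip (rs : List (List Char × List Char)) (w t : List Char)
    (H : ∀ r ∈ rs, ∀ p, p < w.length → ¬ (w.drop p <+: r.1) ∧ ¬ (r.1 <+: w.drop p)) :
    seqF rs (w ++ t) = (w ++ (seqF rs t).1, (seqF rs t).2) := by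
  induction rs generalizing t with
  | nil => simp [seqF]
  | cons r rs ih =>
    simp only [seqF]
    rw [rep1_skip r.1 r.2 w t (H r (by simp))]
    rw [ih _ (fun r' hr' => H r' (by simp [hr']))]

-- decide facts
theorem Hne : ∀ r ∈ rtlRules, r.1 ≠ [] := by decide
theorem HA : ∀ r ∈ rtlRules, ∀ r' ∈ rtlRules, ∀ p, p < r.2.length →
    ¬ (r.2.drop p <+: r'.1) ∧ ¬ (r'.1 <+: r.2.drop p) := by decide
theorem HB : ∀ r ∈ rtlRules, ∀ r' ∈ rtlRules, ∀ q, q < r'.1.length →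
    ¬ (r'.1.drop q <+: r.2) ∧ ¬ (r.2 <+: r'.1.drop q) := by decide
theorem HC : ∀ r ∈ rtlRules, ∀ r' ∈ rtlRules, r ≠ r' → ∀ p, p < r.1.length →
    ¬ (r.1.drop p <+: r'.1) ∧ ¬ (r'.1 <+: r.1.drop p) := by decide
theorem Hnodup : rtlRules.Nodup := by decide

theorem cons_head_drop (l : List Char) (h : 0 < l.length) : l = l[0] :: l.drop 1 := by
  have := List.drop_eq_getElem_cons (l := l) (i := 0) h
  simpa using this

theorem seqF_noMatch (rs : List (List Char × List Char)) (hsub : ∀ r ∈ rs, r ∈ rtlRules)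
    (c : Char) (t : List Char) (h : ∀ r ∈ rs, ¬ (r.1 <+: c :: t)) :
    seqF rs (c :: t) = (c :: (seqF rs t).1, (seqF rs t).2) := by
  induction rs generalizing t with
  | nil => simp [seqF]
  | cons r rs ih =>
    simp only [seqF]
    have hr : r ∈ rtlRules := hsub r (by simp)
    rw [rep1_cons_neg r.1 r.2 c t (h r (by simp))]
    rw [ih (fun r' hr' => hsub r' (by simp [hr'])) _ ?_]
    intro r' hr' hcon
    have hr'm : r' ∈ rtlRules := hsub r' (by simp [hr'])
    have hne' : r'.1 ≠ [] := Hne r' hr'm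
    have hlen : 0 < r'.1.length := List.length_pos_iff.mpr hne'
    rw [cons_head_drop r'.1 hlen] at hcon
    obtain ⟨hc0, htail⟩ := List.cons_prefix_cons.mp hcon
    by_cases h1 : 1 < r'.1.length
    · have hin := rep1_no_new r.1 r.2 r'.1
        (fun q hq => HB r hr r' hr'm q hq) t 1 h1 htail
      apply h r' (by simp [hr'])
      rw [cons_head_drop r'.1 hlen]
      exact List.cons_prefix_cons.mpr ⟨hc0, hin⟩
    · have hd : r'.1.drop 1 = [] := List.drop_eq_nil_iff.mpr (by omega)
      apply h r' (by simp [hr'])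
      rw [cons_head_drop r'.1 hlen, hd]
      exact List.cons_prefix_cons.mpr ⟨hc0, List.nil_prefix⟩

theorem seqF_match (pre post : List (List Char × List Char)) (o n : List Char) (ho : o ≠ [])
    (h1 : ∀ r ∈ pre, ∀ p, p < o.length → ¬ (o.drop p <+: r.1) ∧ ¬ (r.1 <+: o.drop p))
    (h2 : ∀ r ∈ post, ∀ p, p < n.length → ¬ (n.drop p <+: r.1) ∧ ¬ (r.1 <+: n.drop p))
    (t : List Char) :
    seqF (pre ++ (o, n) :: post) (o ++ t) =
      (n ++ (seqF (pre ++ (o, n) :: post) t).1, (seqF (pre ++ (o, n) :: post) t).2 + 1) := by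
  rw [seqF_append, seqF_append]
  rw [seqF_skip pre o t h1]
  simp only [seqF]
  rw [rep1_match o n _ ho]
  rw [seqF_skip post n _ h2]
  simp [Nat.add_assoc, Nat.add_comm, Nat.add_left_comm]

theorem seqF_nil (rs : List (List Char × List Char)) : seqF rs [] = ([], 0) := by
  induction rs with
  | nil => rfl
  | cons r rs ih => simp only [seqF]; rw [show rep1 r.1 r.2 [] = ([], 0) from by simp [rep1]]; simp [ih]

theorem main_scan (s : List Char) :
    scanRTL s = ((seqF rtlRules s).1, ((seqF rtlRules s).2 : Int)) := by
  fun_induction scanRTL s with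
  | case1 => simp [seqF_nil]
  | case2 c t r heq rest ih =>
    have hrm : r ∈ rtlRules := List.mem_of_find?_eq_some heq
    have hp' := List.find?_some heq
    simp only [List.isPrefixOf_iff_prefix] at hp'
    have hpref : r.1 <+: c :: t := hp'
    obtain ⟨t', ht'⟩ := hpref
    have hone : r.1 ≠ [] := Hne r hrm
    have hdrop : t.drop (r.1.length - 1) = t' := by
      cases hr1 : r.1 with
      | nil => exact absurd hr1 hone
      | cons a as =>
        rw [hr1] at ht'
        have : as ++ t' = t := by
          have := ht'
          simp only [List.cons_append, List.cons.injEq] at this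
          exact this.2
        rw [← this]
        simp
    obtain ⟨pre, post, hsplit⟩ := List.mem_iff_append.mp hrm
    have hnd : (pre ++ r :: post).Nodup := hsplit ▸ Hnodup
    rw [List.nodup_append] at hnd
    have hrnp : r ∉ pre := fun hm => hnd.2.2 r hm r (by simp) rfl
    have h1 : ∀ r' ∈ pre, ∀ p, p < r.1.length →
        ¬ (r.1.drop p <+: r'.1) ∧ ¬ (r'.1 <+: r.1.drop p) := by
      intro r' hr' p hp
      have hr'm : r' ∈ rtlRules := hsplit ▸ List.mem_append_left _ hr'
      have hne : r ≠ r' := fun he => hrnp (he ▸ hr')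
      exact HC r hrm r' hr'm hne p hp
    have h2 : ∀ r' ∈ post, ∀ p, p < r.2.length →
        ¬ (r.2.drop p <+: r'.1) ∧ ¬ (r'.1 <+: r.2.drop p) := by
      intro r' hr' p hp
      have hr'm : r' ∈ rtlRules := hsplit ▸ List.mem_append_right _ (by simp [hr'])
      exact HA r hrm r' hr'm p hp
    have hmatch := seqF_match pre post r.1 r.2 hone h1 h2 t'
    rw [← hsplit] at hmatch
    have hrest : rest = scanRTL (t.drop (r.1.length - 1)) := rfl
    rw [hdrop] at ih
    rw [hrest, hdrop, ih, ← ht']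
    rw [hmatch]
    simp
  | case3 c t heq rest ih =>
    have hnone : ∀ r ∈ rtlRules, ¬ (r.1 <+: c :: t) := by
      intro r hr hcon
      have := List.find?_eq_none.mp heq r hr
      simp [List.isPrefixOf_iff_prefix] at this
      exact this hcon
    rw [seqF_noMatch rtlRules (fun r hr => hr) c t hnone]
    have hrest : rest = scanRTL t := rfl
    rw [hrest, ih]

theorem foldS (rsS : List (String × String)) (s : String) (k : Int)
    (h : ∀ r ∈ rsS, r.1.toList ≠ []) :
    rsS.foldl (fun st rule =>
        let count := PySem.Str.count st.1 rule.1
        if count ≠ 0 then (PySem.Str.replace st.1 rule.1 rule.2, st.2 + (count : Int)) else st) (s, k)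
    = (String.ofList (seqF (rsS.map (fun r => (r.1.toList, r.2.toList))) s.toList).1,
       k + ((seqF (rsS.map (fun r => (r.1.toList, r.2.toList))) s.toList).2 : Int)) := by
  induction rsS generalizing s k with
  | nil => simp [seqF, String.ofList_toList]
  | cons r rs ih =>
    have hone : r.1.toList ≠ [] := h r (by simp)
    have hcnt : PySem.Chars.count s.toList r.1.toList = (rep1 r.1.toList r.2.toList s.toList).2 :=
      count_eq_rep1 _ _ r.2.toList hone
    have hcnt' : PySem.Str.count s r.1 = (rep1 r.1.toList r.2.toList s.toList).2 := by
      rw [PySem.Str.count_eq, hcnt]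
    simp only [List.foldl_cons, List.map_cons, seqF]
    by_cases hc : (rep1 r.1.toList r.2.toList s.toList).2 = 0
    · rw [if_neg (by simp [hcnt, hc])]
      rw [ih s k (fun r' hr' => h r' (by simp [hr']))]
      rw [rep1_cnt_zero _ _ _ hc, hc]
      simp
    · rw [if_pos (by simp [hcnt, hc])]
      rw [ih (PySem.Str.replace s r.1 r.2) (k + (PySem.Str.count s r.1 : Int))
        (fun r' hr' => h r' (by simp [hr']))]
      have hrep : (PySem.Str.replace s r.1 r.2).toList = (rep1 r.1.toList r.2.toList s.toList).1 := by
        rw [PySem.Str.toList_replace, replace_eq_rep1 _ _ _ hone]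
      rw [hrep, hcnt']
      simp only [Prod.mk.injEq, true_and]
      push_cast
      ring

-- ===== VERDICT =====
theorem apply_rtl_layout_fixes_spec : Claim_equal_apply_rtl_layout_fixes := by
  intro text _
  unfold Spec_apply_rtl_layout_fixes apply_rtl_layout_fixes apply_rtl_layout_fixes_alt
  rw [foldS _ text 0 (by decide)]
  have hl : List.map (fun r : String × String => (r.1.toList, r.2.toList))
      [("justify=\"left\"", "justify=\"right\""),
       ("justify='left'", "justify='right'"),
       ("anchor=\"w\"", "anchor=\"e\""),
       ("anchor='w'", "anchor='e'"),
       ("sticky=\"w\"", "sticky=\"e\""),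
       ("sticky='w'", "sticky='e'"),
       ("side=\"left\"", "side=\"right\""),
       ("side='left'", "side='right'")] = rtlRules := by decide
  rw [hl]
  rw [main_scan text.toList]
  norm_num
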